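-- pv_equiv track=rewrite | github.com/JardinConnect/GardenIOT | iot-esp32/src/alert/alert_manager.py | _separate_index_and_code
-- ===== SOURCE A (Python) =====
-- def _separate_index_and_code(sensor_key):
--     """
--     Separate index and code from sensor key like "1TA", "2HA", etc.
--     Returns: (index, code)
--     """
--     if not sensor_key or len(sensor_key) < 2:
--         return None, None
--
--     # Extract digits from beginning
--     index_str = ''
--     code_str = ''
--
--     for i, char in enumerate(sensor_key):
--         if char.isdigit():
--             index_str += char
--         else:
--             code_str = sensor_key[i:]
--             break
--
--     if index_str and code_str:
--         return int(index_str), code_str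
--     return None, None
-- ===== SOURCE B (Python) =====
-- def _separate_index_and_code(sensor_key):
--     if len(sensor_key) < 2:
--         return None, None
--     # split at end of the leading digit run via lstrip, no explicit loop
--     tail = sensor_key.lstrip('0123456789')
--     head = sensor_key[:len(sensor_key) - len(tail)]
--     if head and tail:
--         return int(head), tail
--     return None, None
-- ===== Notes on version B (the rewrite author's own statement) =====
-- stated objective: idiomatic
-- what changed: replaces the enumerate/accumulate/break loop with a single lstrip of the ten digit characters that splits off the leading digit run, then one slice
import Mathlib
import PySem

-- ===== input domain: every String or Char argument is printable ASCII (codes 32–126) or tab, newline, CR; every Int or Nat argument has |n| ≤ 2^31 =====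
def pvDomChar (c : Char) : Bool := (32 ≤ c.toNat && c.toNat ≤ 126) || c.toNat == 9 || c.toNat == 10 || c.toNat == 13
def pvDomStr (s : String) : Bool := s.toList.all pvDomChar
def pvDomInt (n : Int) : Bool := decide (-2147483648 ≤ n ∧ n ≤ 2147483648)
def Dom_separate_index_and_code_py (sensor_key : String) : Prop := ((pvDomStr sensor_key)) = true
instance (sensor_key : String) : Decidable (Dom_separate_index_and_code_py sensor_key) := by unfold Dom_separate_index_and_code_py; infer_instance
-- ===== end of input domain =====

-- ===== PORT A =====
-- B replaces A's enumerate/accumulate/break loop by a single lstrip-based split (idiomatic, same cost).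
-- Loop of A over enumerate(sensor_key): accumulate digits into index_str; at the first
-- non-digit char set code_str = sensor_key[i:] and break.  (char.isdigit = Char.isDigit on
-- the ASCII domain; sensor_key[i:] for 0 ≤ i ≤ len is List.drop i; int(index_str) is
-- PySem.Int.ofStr?, which is some-valued on the nonempty digit run it is applied to.)
def pvLoopA (orig : List Char) : List Char → Nat → List Char → List Char × List Char
  | [], _, indexStr => (indexStr, [])            -- loop ends without break: code_str stays ''
  | c :: rest, i, indexStr =>
    if c.isDigit then pvLoopA orig rest (i + 1) (indexStr ++ [c])
    else (indexStr, orig.drop i)                 -- code_str = sensor_key[i:]; break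

def separate_index_and_code_py (sensor_key : String) : Option Int × Option String :=
  if sensor_key.toList = [] ∨ sensor_key.toList.length < 2 then (none, none)
  else
    let r := pvLoopA sensor_key.toList sensor_key.toList 0 []
    if r.1 ≠ [] ∧ r.2 ≠ [] then
      (PySem.Int.ofStr? (String.mk r.1), some (String.mk r.2))
    else (none, none)

-- ===== PORT B =====
-- lstrip of the ten digit characters removes exactly the leading digit run, so
-- tail = dropWhile isDigit and head = sensor_key[:len - len(tail)].
def separate_index_and_code_py_alt (sensor_key : String) : Option Int × Option String :=
  if sensor_key.toList.length < 2 then (none, none)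
  else
    let tail := sensor_key.toList.dropWhile Char.isDigit
    let head := sensor_key.toList.take (sensor_key.toList.length - tail.length)
    if head ≠ [] ∧ tail ≠ [] then
      (PySem.Int.ofStr? (String.mk head), some (String.mk tail))
    else (none, none)

-- ===== PRECONDITION & SPEC =====
def Spec_separate_index_and_code_py (sensor_key : String) (out : Option Int × Option String) : Prop := out = separate_index_and_code_py_alt sensor_key
instance (sensor_key : String) (out : Option Int × Option String) : Decidable (Spec_separate_index_and_code_py sensor_key out) := by unfold Spec_separate_index_and_code_py; infer_instance

-- ===== CLAIM (what is proved, stated in full; the proofs are below) =====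
def Claim_equal_separate_index_and_code_py : Prop := ∀ (sensor_key : String), Dom_separate_index_and_code_py sensor_key → Spec_separate_index_and_code_py sensor_key (separate_index_and_code_py sensor_key)

-- ===== LEMMAS AND PROOFS =====
-- A's loop computes (takeWhile isDigit, dropWhile isDigit) of the remaining suffix.
theorem pvLoopA_eq (orig : List Char) : ∀ (cs : List Char) (i : Nat) (acc : List Char),
    cs = orig.drop i →
    pvLoopA orig cs i acc = (acc ++ cs.takeWhile Char.isDigit, cs.dropWhile Char.isDigit)
  | [], i, acc, h => by simp [pvLoopA]
  | c :: rest, i, acc, h => by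
    by_cases hc : c.isDigit
    · have hrest : rest = orig.drop (i + 1) := by
        rw [← List.tail_drop, ← h]; rfl
      simp [pvLoopA, hc, pvLoopA_eq orig rest (i + 1) (acc ++ [c]) hrest]
    · simp [pvLoopA, hc, ← h]

theorem pvTake_eq (cs : List Char) :
    cs.take (cs.length - (cs.dropWhile Char.isDigit).length) = cs.takeWhile Char.isDigit := by
  set t := cs.takeWhile Char.isDigit with ht
  set d := cs.dropWhile Char.isDigit with hd
  have h : t ++ d = cs := List.takeWhile_append_dropWhile
  have hsum := congrArg List.length h
  rw [List.length_append] at hsum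
  have hlen : cs.length - d.length = t.length := by omega
  rw [hlen, ← h]
  exact List.take_left

-- ===== VERDICT (by name: the statement is the Claim_ definition above) =====
theorem separate_index_and_code_py_spec : Claim_equal_separate_index_and_code_py := by
  intro sensor_key _
  unfold Spec_separate_index_and_code_py separate_index_and_code_py separate_index_and_code_py_alt
  by_cases hlen : sensor_key.toList.length < 2
  · rw [if_pos (Or.inr hlen), if_pos hlen]
  · have hguard : ¬ (sensor_key.toList = [] ∨ sensor_key.toList.length < 2) := by
      intro hor
      rcases hor with he | hl
      · exact hlen (by simp [he])
      · exact hlen hl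
    rw [if_neg hguard, if_neg hlen]
    simp only [pvLoopA_eq sensor_key.toList sensor_key.toList 0 [] (by simp),
      List.nil_append, pvTake_eq]
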